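-- pv_equiv track=rewrite | github.com/DanielNSaga/agentic-engineer | src/ae/tools/snippets.py | _candidate_repo_paths
-- ===== SOURCE A (Python) =====
-- def _candidate_repo_paths(requested: str) -> list[str]:
--     """Generate path variants to compensate for relative or normalised forms."""
--     trimmed = requested.strip()
--     if not trimmed:
--         return []
--
--     variants: list[str] = []
--     seen: set[str] = set()
--
--     def _add(entry: str) -> None:
--         key = entry.strip()
--         if not key or key in seen:
--             return
--         seen.add(key)
--         variants.append(key)
--
--     _add(trimmed)
--
--     normalised = trimmed.replace("\\", "/")
--     _add(normalised)
--
--     cleaned = normalised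
--     while cleaned.startswith("./"):
--         cleaned = cleaned[2:]
--     _add(cleaned)
--
--     parts = [part for part in cleaned.split("/") if part]
--     for index in range(1, len(parts)):
--         candidate = "/".join(parts[index:])
--         _add(candidate)
--
--     return variants
-- ===== SOURCE B (Python) =====
-- def _candidate_repo_paths(requested: str) -> list[str]:
--     """Generate path variants to compensate for relative or normalised forms."""
--     trimmed = requested.strip()
--     if not trimmed:
--         return []
--     normalised = trimmed.replace("\\", "/")
--     cleaned = normalised
--     while cleaned.startswith("./"):
--         cleaned = cleaned[2:]
--     # Head entries: at most three, deduplicated by direct comparison -- no seen-set.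
--     head = [trimmed]
--     if normalised != trimmed:
--         head.append(normalised)
--     stripped = cleaned.strip()
--     if stripped and stripped != trimmed and stripped != normalised:
--         head.append(stripped)
--     # Suffix joins, built incrementally right-to-left (each join extends the previous
--     # one) instead of re-joining per index.  The stripped suffixes are pairwise
--     # distinct (their '/'-counts differ) and strictly shorter than every head entry
--     # or with fewer '/' than `stripped`, so no dedup structure is needed.
--     parts = [part for part in cleaned.split("/") if part]
--     tail = []
--     if len(parts) >= 2:
--         suffix = parts[-1]
--         tail.append(suffix)
--         for part in reversed(parts[1:-1]):
--             suffix = part + "/" + suffix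
--             tail.append(suffix)
--         tail.reverse()
--     return head + [s for s in map(str.strip, tail) if s]
-- ===== Notes on version B (the rewrite author's own statement) =====
-- stated objective: alternative
-- what changed: B eliminates A's seen-set/variants dedup machinery entirely: the three head variants are deduplicated by direct comparisons, and the suffix joins are built incrementally right-to-left (each join extends the previous) and emitted with no dedup at all, relying on the invariant that stripped suffix joins are pairwise distinct and never collide with a head entry.
import Mathlib
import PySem

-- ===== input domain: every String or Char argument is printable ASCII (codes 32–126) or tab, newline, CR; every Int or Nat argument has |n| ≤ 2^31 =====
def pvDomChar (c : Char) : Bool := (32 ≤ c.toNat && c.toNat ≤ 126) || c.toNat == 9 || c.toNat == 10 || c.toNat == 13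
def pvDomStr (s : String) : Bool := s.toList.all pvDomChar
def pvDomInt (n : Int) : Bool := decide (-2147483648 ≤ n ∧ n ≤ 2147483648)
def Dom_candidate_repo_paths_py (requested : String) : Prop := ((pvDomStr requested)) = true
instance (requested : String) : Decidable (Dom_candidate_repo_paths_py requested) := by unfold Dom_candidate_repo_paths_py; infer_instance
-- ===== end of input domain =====

-- B removes A's seen-set/variants dedup machinery: head variants are deduplicated by direct
-- comparison and the suffix joins are built incrementally right-to-left and emitted with no
-- dedup at all (they are provably pairwise distinct and disjoint from the head); objective: alternative.

-- ===== PORT A =====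

-- the closure _add acting on the state (variants, seen)
def pvAdd (st : List String × PySem.Set String) (entry : String) : List String × PySem.Set String :=
  let key := PySem.Str.strip entry
  if key = "" ∨ PySem.Set.contains st.2 key = true then st
  else (st.1 ++ [key], PySem.Set.add st.2 key)

-- the while-loop `while cleaned.startswith("./"): cleaned = cleaned[2:]`, exact on List Char
def pvCleanChars : List Char → List Char
  | '.' :: '/' :: rest => pvCleanChars rest
  | cs => cs

def candidate_repo_paths_py (requested : String) : List String :=
  let trimmed := PySem.Str.strip requested
  if trimmed = "" then []
  else
    let st1 := pvAdd ([], PySem.Set.empty) trimmed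
    let normalised := PySem.Str.replace trimmed "\\" "/"
    let st2 := pvAdd st1 normalised
    let cleaned := String.ofList (pvCleanChars normalised.toList)
    let st3 := pvAdd st2 cleaned
    let parts := ((PySem.Chars.splitOn cleaned.toList ['/']).map String.ofList).filter (fun p => p ≠ "")
    let stF := (PySem.List.pyRange 1 (parts.length : Int) 1).foldl
      (fun st i => pvAdd st (PySem.Str.join "/" (parts.drop i.toNat))) st3
    stF.1

-- ===== PORT B =====

-- B's copy of the same "./"-stripping while loop
def pvCleanCharsB : List Char → List Char
  | '.' :: '/' :: rest => pvCleanCharsB rest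
  | cs => cs

def candidate_repo_paths_py_alt (requested : String) : List String :=
  let trimmed := PySem.Str.strip requested
  if trimmed = "" then []
  else
    let normalised := PySem.Str.replace trimmed "\\" "/"
    let cleaned := String.ofList (pvCleanCharsB normalised.toList)
    let head1 := [trimmed]
    let head2 := if normalised ≠ trimmed then head1 ++ [normalised] else head1
    let stripped := PySem.Str.strip cleaned
    let head := if stripped ≠ "" ∧ stripped ≠ trimmed ∧ stripped ≠ normalised
                then head2 ++ [stripped] else head2
    let parts := ((PySem.Chars.splitOn cleaned.toList ['/']).map String.ofList).filter (fun p => p ≠ "")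
    let tail :=
      if parts.length ≥ 2 then
        let suffix0 := PySem.List.pyGetD parts (-1) ""      -- parts[-1]; in range since len ≥ 2
        let st := ((PySem.List.slice parts (some 1) (some (-1))).reverse).foldl
          (fun (st : String × List String) part =>
            -- suffix = part + "/" + suffix  (string concatenation, exact on code points)
            let suffix := String.ofList (part.toList ++ '/' :: st.1.toList)
            (suffix, st.2 ++ [suffix]))
          (suffix0, [suffix0])
        st.2.reverse
      else []
    head ++ ((tail.map PySem.Str.strip).filter (fun s => s ≠ ""))

-- ===== PRECONDITION & SPEC =====
def Spec_candidate_repo_paths_py (requested : String) (out : List String) : Prop := out = candidate_repo_paths_py_alt requested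
instance (requested : String) (out : List String) : Decidable (Spec_candidate_repo_paths_py requested out) := by unfold Spec_candidate_repo_paths_py; infer_instance

-- ===== CLAIM (what is proved, stated in full; the proofs are below) =====
def Claim_equal_candidate_repo_paths_py : Prop := ∀ (requested : String), Dom_candidate_repo_paths_py requested → Spec_candidate_repo_paths_py requested (candidate_repo_paths_py requested)

-- ===== LEMMAS AND PROOFS =====

-- The character substitution performed by `trimmed.replace("\\", "/")`
def pvSub (c : Char) : Char := if c = '\\' then '/' else c

-- Clean recursive form of `cs.split("/")` (single-character separator)
def pvSplit : List Char → List (List Char)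
  | [] => [[]]
  | c :: t =>
    if c = '/' then [] :: pvSplit t
    else
      match pvSplit t with
      | [] => [[c]]           -- unreachable: pvSplit never returns []
      | h :: r => (c :: h) :: r

lemma pvSplit_ne_nil (cs : List Char) : pvSplit cs ≠ [] := by
  cases cs with
  | nil => simp [pvSplit]
  | cons c t =>
    simp only [pvSplit]
    split
    · simp
    · split <;> simp

lemma pvCleanChars_eq_B (cs : List Char) : pvCleanChars cs = pvCleanCharsB cs := by
  induction cs using pvCleanChars.induct with
  | case1 rest ih => rw [pvCleanChars, pvCleanCharsB]; exact ih
  | case2 cs h =>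
    rw [pvCleanChars.eq_def]
    split
    · exact absurd rfl (h _)
    · rw [pvCleanCharsB.eq_def]
      split
      · exact absurd rfl (h _)
      · rfl

-- pvAdd on a duplicated state: skip empties, otherwise it is exactly Set.add of the stripped key
lemma pvAdd_dup (s : List String) (e : String) :
    pvAdd (s, s) e =
      if PySem.Str.strip e = "" then (s, s)
      else (PySem.Set.add s (PySem.Str.strip e), PySem.Set.add s (PySem.Str.strip e)) := by
  by_cases h : PySem.Str.strip e = ""
  · simp [pvAdd, h]
  · by_cases hc : PySem.Str.strip e ∈ s
    · simp [pvAdd, PySem.Set.add, h, hc]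
    · simp [pvAdd, PySem.Set.add, h, hc]

-- folding _add over entries from a duplicated state = Set.add-fold over the stripped non-empty entries
lemma foldl_pvAdd (entries : List String) (s : List String) :
    entries.foldl pvAdd (s, s) =
      (((entries.map PySem.Str.strip).filter (fun x => x ≠ "")).foldl PySem.Set.add s,
       ((entries.map PySem.Str.strip).filter (fun x => x ≠ "")).foldl PySem.Set.add s) := by
  induction entries generalizing s with
  | nil => simp
  | cons e es ih =>
    by_cases h : PySem.Str.strip e = ""
    · simpa [pvAdd_dup, h] using ih s
    · simpa [pvAdd_dup, h] using ih (PySem.Set.add s (PySem.Str.strip e))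

-- the whole _add chain of A, from the empty state, equals a strip/filter/dedup pass
lemma pvAdd_chain (t n c : String) (f : Int → String) (r : List Int) :
    (r.foldl (fun st i => pvAdd st (f i))
        (pvAdd (pvAdd (pvAdd ([], PySem.Set.empty) t) n) c)).1
      = PySem.List.dedup
          ((([t, n, c] ++ r.map f).map PySem.Str.strip).filter (fun s => s ≠ "")) := by
  rw [PySem.List.dedup_eq_ofList, PySem.Set.ofList_eq_foldl]
  have hfold := foldl_pvAdd ([t, n, c] ++ r.map f) []
  simp only [List.foldl_append, List.foldl_map, List.foldl_cons, List.foldl_nil] at hfold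
  exact congrArg Prod.fst hfold

-- ---- splitOn on a single-character separator is pvSplit ----

-- prepend a chunk onto the head piece of a split
def pvConsHead (x : List Char) : List (List Char) → List (List Char)
  | [] => [x]
  | h :: r => (x ++ h) :: r

lemma splitOn_go_spec (l : List Char) : ∀ (fuel : Nat) (cur : List Char)
    (acc : List (List Char)), l.length ≤ fuel →
    PySem.Chars.splitOn.go ['/'] fuel l cur acc
      = acc.reverse ++ pvConsHead cur.reverse (pvSplit l) := by
  induction l with
  | nil =>
    intro fuel cur acc _
    cases fuel <;> simp [PySem.Chars.splitOn.go, pvSplit, pvConsHead]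
  | cons c t ih =>
    intro fuel cur acc hf
    cases fuel with
    | zero => simp at hf
    | succ f =>
      rw [PySem.Chars.splitOn.go]
      by_cases hc : c = '/'
      · subst hc
        have hpre : (['/'] : List Char).isPrefixOf ('/' :: t) = true := by
          simp [List.isPrefixOf]
        rw [if_pos hpre]
        simp only [List.length_cons, List.length_nil, List.drop_succ_cons, List.drop_zero]
        rw [ih f [] (cur.reverse :: acc) (by simp only [List.length_cons] at hf; omega)]
        obtain ⟨h, r, hr⟩ := List.exists_cons_of_ne_nil (pvSplit_ne_nil t)
        simp [pvSplit, hr, pvConsHead]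
      · have hpre : (['/'] : List Char).isPrefixOf (c :: t) = false := by
          simp [List.isPrefixOf]
          intro h; exact hc h.symm
        rw [if_neg (by simp [hpre])]
        have := ih f (c :: cur) acc (by simpa using Nat.lt_succ_iff.mp hf)
        rw [this]
        obtain ⟨h, r, hr⟩ := List.exists_cons_of_ne_nil (pvSplit_ne_nil t)
        simp [pvSplit, hr, hc, pvConsHead]

lemma splitOn_single (cs : List Char) : PySem.Chars.splitOn cs ['/'] = pvSplit cs := by
  rw [PySem.Chars.splitOn, splitOn_go_spec cs (cs.length + 1) [] [] (by omega)]
  obtain ⟨h, r, hr⟩ := List.exists_cons_of_ne_nil (pvSplit_ne_nil cs)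
  simp [hr, pvConsHead]

-- ---- join facts ----

lemma join_pvSplit (cs : List Char) : PySem.Chars.join ['/'] (pvSplit cs) = cs := by
  induction cs with
  | nil => simp [pvSplit, PySem.Chars.join_singleton]
  | cons c t ih =>
    obtain ⟨h, r, hr⟩ := List.exists_cons_of_ne_nil (pvSplit_ne_nil t)
    by_cases hc : c = '/'
    · subst hc
      have hs : pvSplit ('/' :: t) = [] :: pvSplit t := by simp [pvSplit]
      rw [hs, hr]
      rw [hr] at ih
      rw [PySem.Chars.join_cons_cons, ih]
      rfl
    · simp only [pvSplit, if_neg hc]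
      rw [hr] at ih ⊢
      cases r with
      | nil =>
        rw [PySem.Chars.join_singleton] at ih ⊢
        simp [ih]
      | cons q r' =>
        rw [PySem.Chars.join_cons_cons] at ih ⊢
        rw [← ih]
        simp

lemma pvSplit_no_slash (cs : List Char) : ∀ p ∈ pvSplit cs, '/' ∉ p := by
  induction cs with
  | nil => simp [pvSplit]
  | cons c t ih =>
    obtain ⟨h, r, hr⟩ := List.exists_cons_of_ne_nil (pvSplit_ne_nil t)
    by_cases hc : c = '/'
    · subst hc
      have hs : pvSplit ('/' :: t) = [] :: pvSplit t := by simp [pvSplit]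
      rw [hs]
      intro p hp
      rcases List.mem_cons.mp hp with h1 | h2
      · simp [h1]
      · exact ih p h2
    · simp only [pvSplit, if_neg hc]
      rw [hr] at ih ⊢
      intro p hp
      rcases List.mem_cons.mp hp with h1 | h2
      · subst h1
        intro hin
        rcases List.mem_cons.mp hin with h3 | h4
        · exact hc h3.symm
        · exact ih h (List.mem_cons_self) h4
      · exact ih p (List.mem_cons_of_mem _ h2)

lemma count_join_sepfree (l : List (List Char)) (hne : l ≠ []) (hf : ∀ p ∈ l, '/' ∉ p) :
    (PySem.Chars.join ['/'] l).count '/' = l.length - 1 := by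
  induction l with
  | nil => simp at hne
  | cons p t ih =>
    cases t with
    | nil =>
      rw [PySem.Chars.join_singleton]
      simp [List.count_eq_zero.mpr (hf p (List.mem_cons_self))]
    | cons q r =>
      rw [PySem.Chars.join_cons_cons, List.count_append, List.count_append,
        List.count_eq_zero.mpr (hf p (List.mem_cons_self)),
        ih (by simp) (fun x hx => hf x (List.mem_cons_of_mem _ hx))]
      have h1 : List.count '/' (['/'] : List Char) = 1 := by decide
      simp only [h1, List.length_cons]
      omega

lemma len_join_eq (l : List (List Char)) (hne : l ≠ []) :
    (PySem.Chars.join ['/'] l).length + 1 = (l.map List.length).sum + l.length := by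
  induction l with
  | nil => simp at hne
  | cons p t ih =>
    cases t with
    | nil => simp [PySem.Chars.join_singleton]
    | cons q r =>
      rw [PySem.Chars.join_cons_cons]
      have := ih (by simp)
      simp only [List.length_append, List.map_cons, List.sum_cons, List.length_cons,
        List.length_nil] at *
      omega

lemma length_join_sublist (l₁ l₂ : List (List Char)) (h : l₁.Sublist l₂) :
    (PySem.Chars.join ['/'] l₁).length ≤ (PySem.Chars.join ['/'] l₂).length := by
  cases l₁ with
  | nil => simp [PySem.Chars.join_nil]
  | cons p t =>
    have h2 : (p :: t : List (List Char)) ≠ [] := by simp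
    have hl2 : l₂ ≠ [] := by
      intro hh; subst hh; exact h2 (List.sublist_nil.mp h)
    have e1 := len_join_eq (p :: t) h2
    have e2 := len_join_eq l₂ hl2
    have hsum : ((p :: t).map List.length).sum ≤ (l₂.map List.length).sum :=
      List.Sublist.sum_le_sum (h.map List.length) (by intro a _; exact Nat.zero_le a)
    have hlen : (p :: t).length ≤ l₂.length := h.length_le
    omega

lemma length_join_drop (l : List (List Char)) (k : Nat) :
    (PySem.Chars.join ['/'] (l.drop k)).length ≤ (PySem.Chars.join ['/'] l).length := by
  exact length_join_sublist _ _ (List.drop_sublist k l)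

lemma length_join_drop_lt (p : List Char) (rest : List (List Char)) (hr : rest ≠ []) (k : Nat) (hk : 1 ≤ k) :
    (PySem.Chars.join ['/'] ((p :: rest).drop k)).length < (PySem.Chars.join ['/'] (p :: rest)).length := by
  obtain ⟨q, r, hqr⟩ := List.exists_cons_of_ne_nil hr
  have hdrop : (p :: rest).drop k = rest.drop (k - 1) := by
    obtain ⟨k', rfl⟩ : ∃ k', k = k' + 1 := ⟨k - 1, by omega⟩
    simp
  rw [hdrop, hqr, PySem.Chars.join_cons_cons]
  have h1 := length_join_drop (q :: r) (k - 1)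
  simp only [List.length_append, List.length_cons, List.length_nil]
  omega

lemma length_join_filter (l : List (List Char)) :
    (PySem.Chars.join ['/'] (l.filter (fun p => p ≠ []))).length ≤ (PySem.Chars.join ['/'] l).length := by
  exact length_join_sublist _ _ List.filter_sublist

-- ---- strip facts ----

lemma count_dropWhile (p : Char → Bool) (l : List Char) (a : Char) (ha : p a = false) :
    (l.dropWhile p).count a = l.count a := by
  conv_rhs => rw [← List.takeWhile_append_dropWhile (p := p) (l := l)]
  rw [List.count_append]
  have hz : (l.takeWhile p).count a = 0 := by
    refine List.count_eq_zero.mpr ?_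
    intro hmem
    have := List.mem_takeWhile_imp hmem
    rw [ha] at this
    exact Bool.false_ne_true this
  omega

lemma count_strip (s : List Char) (a : Char) (ha : PySem.Chars.isspace a = false) :
    (PySem.Chars.strip s).count a = s.count a := by
  rw [PySem.Chars.strip, PySem.Chars.rstrip, PySem.Chars.lstrip, List.count_reverse,
    count_dropWhile _ _ _ ha, List.count_reverse, count_dropWhile _ _ _ ha]

lemma length_strip_le (s : List Char) : (PySem.Chars.strip s).length ≤ s.length := by
  rw [PySem.Chars.strip, PySem.Chars.rstrip, PySem.Chars.lstrip]
  calc ((List.dropWhile PySem.Chars.isspace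
          (List.dropWhile PySem.Chars.isspace s).reverse).reverse).length
      ≤ (List.dropWhile PySem.Chars.isspace s).reverse.length := by
        rw [List.length_reverse]; exact List.length_dropWhile_le _ _
    _ ≤ s.length := by
        rw [List.length_reverse]; exact List.length_dropWhile_le _ _

lemma dropWhile_idem (p : Char → Bool) (l : List Char) :
    (l.dropWhile p).dropWhile p = l.dropWhile p := by
  induction l with
  | nil => rfl
  | cons c t ih =>
    by_cases h : p c
    · simp [h, ih]
    · simp [h]

-- the head (if any) of dropWhile fails p; hence a nonempty prefix of it is dropWhile-stable
lemma dropWhile_eq_self_of_prefix (p : Char → Bool) (l b : List Char)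
    (hpre : b <+: l.dropWhile p) : b.dropWhile p = b := by
  cases hb : b with
  | nil => rfl
  | cons x xs =>
    subst hb
    obtain ⟨t, ht⟩ := hpre
    have hhead : ¬ p x = true := by
      intro hx
      have hd : l.dropWhile p = x :: (xs ++ t) := by rw [← ht]; simp
      have := List.head?_dropWhile_not p l
      rw [hd] at this
      simp [hx] at this
    simp [hhead]

lemma strip_idem (s : List Char) :
    PySem.Chars.strip (PySem.Chars.strip s) = PySem.Chars.strip s := by
  set P := PySem.Chars.isspace with hP
  set a := List.dropWhile P s with ha
  have h1 : PySem.Chars.strip s = (List.dropWhile P a.reverse).reverse := by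
    rw [PySem.Chars.strip, PySem.Chars.rstrip, PySem.Chars.lstrip]
  -- strip s is a prefix of a = lstrip s
  have hpre : (List.dropWhile P a.reverse).reverse <+: a := by
    have hsuf : List.dropWhile P a.reverse <:+ a.reverse := List.dropWhile_suffix P
    obtain ⟨u, hu⟩ := hsuf
    exact ⟨u.reverse, by rw [← List.reverse_append, hu, List.reverse_reverse]⟩
  have hstable : ((List.dropWhile P a.reverse).reverse).dropWhile P
      = (List.dropWhile P a.reverse).reverse := by
    refine dropWhile_eq_self_of_prefix P s _ ?_
    rw [← ha]; exact hpre
  rw [h1, PySem.Chars.strip, PySem.Chars.rstrip, PySem.Chars.lstrip, hstable,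
    List.reverse_reverse, dropWhile_idem]

lemma isspace_pvSub (c : Char) : PySem.Chars.isspace (pvSub c) = PySem.Chars.isspace c := by
  by_cases h : c = '\\'
  · subst h; decide
  · simp [pvSub, h]

lemma strip_map_pvSub (s : List Char) :
    PySem.Chars.strip (s.map pvSub) = (PySem.Chars.strip s).map pvSub := by
  have hcomp : (PySem.Chars.isspace ∘ pvSub) = PySem.Chars.isspace := by
    funext c; exact isspace_pvSub c
  rw [PySem.Chars.strip, PySem.Chars.rstrip, PySem.Chars.lstrip,
    PySem.Chars.strip, PySem.Chars.rstrip, PySem.Chars.lstrip,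
    List.dropWhile_map, hcomp, ← List.map_reverse, List.dropWhile_map, hcomp,
    ← List.map_reverse]

-- ---- pvClean facts ----

lemma length_pvClean_le (s : List Char) : (pvCleanChars s).length ≤ s.length := by
  induction s using pvCleanChars.induct with
  | case1 rest ih => rw [pvCleanChars]; simp; omega
  | case2 cs h =>
    rw [pvCleanChars.eq_def]
    split
    · exact absurd rfl (h _)
    · exact le_refl _

-- ---- dedup plumbing ----

lemma dedup_append_disjoint {α : Type} [BEq α] [LawfulBEq α] (xs ys : List α)
    (hnd : ys.Nodup) (hdj : ∀ y ∈ ys, y ∉ xs) :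
    PySem.List.dedup (xs ++ ys) = PySem.List.dedup xs ++ ys := by
  rw [PySem.List.dedup_eq_ofList, PySem.List.dedup_eq_ofList,
    PySem.Set.ofList_eq_foldl, List.foldl_append, ← PySem.Set.ofList_eq_foldl]
  have : List.foldl PySem.Set.add (PySem.Set.ofList xs) ys
      = PySem.Set.update (PySem.Set.ofList xs) ys := rfl
  rw [this, PySem.Set.update_eq_append_of_disjoint _ _ hnd]
  intro y hy hmem
  exact hdj y hy ((PySem.Set.mem_ofList xs y).mp hmem)

lemma foldl_add_map_injective {α β : Type} [BEq α] [LawfulBEq α] [BEq β] [LawfulBEq β]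
    (f : α → β) (hf : Function.Injective f) (l : List α) : ∀ (s : List α),
    List.foldl PySem.Set.add (s.map f) (l.map f) = (List.foldl PySem.Set.add s l).map f := by
  induction l with
  | nil => intro s; simp
  | cons x t ih =>
    intro s
    have hc : PySem.Set.contains (s.map f) (f x) = PySem.Set.contains s x := by
      simp only [PySem.Set.contains]
      by_cases h : x ∈ s
      · rw [List.contains_iff_mem.mpr h, List.contains_iff_mem.mpr (List.mem_map_of_mem h)]
      · rw [Bool.eq_iff_iff, List.contains_iff_mem, List.contains_iff_mem]
        constructor
        · intro hm
          obtain ⟨y, hy, hyx⟩ := List.mem_map.mp hm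
          exact absurd (hf hyx ▸ hy) h
        · intro hm; exact absurd hm h
    have hadd : PySem.Set.add (s.map f) (f x) = (PySem.Set.add s x).map f := by
      rw [PySem.Set.add, PySem.Set.add, hc]
      split <;> simp
    simp only [List.map_cons, List.foldl_cons, hadd]
    exact ih _

lemma dedup_map_injective {α β : Type} [BEq α] [LawfulBEq α] [BEq β] [LawfulBEq β]
    (f : α → β) (hf : Function.Injective f) (l : List α) :
    PySem.List.dedup (l.map f) = (PySem.List.dedup l).map f := by
  rw [PySem.List.dedup_eq_ofList, PySem.List.dedup_eq_ofList,
    PySem.Set.ofList_eq_foldl, PySem.Set.ofList_eq_foldl]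
  have := foldl_add_map_injective f hf l []
  simpa using this


-- ---- replace on single-character patterns is map ----

lemma replace_go_single (o nw : Char) (l : List Char) : ∀ (fuel : Nat) (acc : List Char),
    l.length ≤ fuel →
    PySem.Chars.replace.go [o] [nw] fuel l acc
      = acc.reverse ++ l.map (fun c => if c = o then nw else c) := by
  induction l with
  | nil =>
    intro fuel acc _
    cases fuel <;> simp [PySem.Chars.replace.go]
  | cons c t ih =>
    intro fuel acc hf
    cases fuel with
    | zero => simp at hf
    | succ f =>
      rw [PySem.Chars.replace.go]
      by_cases hc : c = o
      · subst hc
        rw [if_pos (by simp [List.isPrefixOf])]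
        simp only [List.length_cons, List.length_nil, List.drop_succ_cons, List.drop_zero]
        rw [ih f (([nw].reverse) ++ acc) (by simp only [List.length_cons] at hf; omega)]
        simp
      · rw [if_neg (by simp [List.isPrefixOf]; intro h; exact hc h.symm)]
        rw [ih f (c :: acc) (by simp only [List.length_cons] at hf; omega)]
        simp [hc]

lemma replace_single (o nw : Char) (cs : List Char) :
    PySem.Chars.replace cs [o] [nw] = cs.map (fun c => if c = o then nw else c) := by
  rw [PySem.Chars.replace]
  rw [if_neg (by simp)]
  rw [replace_go_single o nw cs cs.length [] (le_refl _)]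
  simp

-- ---- String-level plumbing ----

lemma ofList_injective : Function.Injective String.ofList := by
  intro a b h
  have := congrArg String.toList h
  simpa using this

lemma strip_ofList (l : List Char) :
    PySem.Str.strip (String.ofList l) = String.ofList (PySem.Chars.strip l) := by
  apply String.toList_inj.mp
  simp

lemma filter_ne_empty_map_ofList (l : List (List Char)) :
    (l.map String.ofList).filter (fun p => p ≠ "")
      = (l.filter (fun p => p ≠ [])).map String.ofList := by
  rw [List.filter_map]
  have hpred : ((fun p => decide (p ≠ "")) ∘ String.ofList)
      = (fun p : List Char => decide (p ≠ [])) := by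
    funext p
    simp [String.ofList_eq_empty_iff]
  rw [hpred]

-- ---- pvJoins in Nat-range form ----

-- abbreviation used only in the proofs below
def pvJoins (parts : List (List Char)) : List (List Char) :=
  (PySem.List.pyRange 1 (parts.length : Int) 1).map
    (fun i => PySem.Chars.join ['/'] (parts.drop i.toNat))

lemma pvJoins_eq (parts : List (List Char)) :
    pvJoins parts = (List.range (parts.length - 1)).map
      (fun k => PySem.Chars.join ['/'] (parts.drop (k + 1))) := by
  unfold pvJoins
  rw [PySem.List.pyRange_one]
  rw [List.map_map]
  have hlen : ((parts.length : Int) - 1).toNat = parts.length - 1 := by omega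
  rw [hlen]
  apply List.map_congr_left
  intro k hk
  simp only [Function.comp_apply]
  have hki : ((1 : Int) + k).toNat = k + 1 := by omega
  rw [hki]

-- ---- explicit Set.add behaviour ----

lemma set_add_of_mem {α : Type} [BEq α] [LawfulBEq α] {s : PySem.Set α} {x : α} (h : x ∈ s) :
    PySem.Set.add s x = s := by
  rw [PySem.Set.add, if_pos]
  rw [PySem.Set.contains, List.contains_iff_mem]
  exact h

lemma set_add_of_not_mem {α : Type} [BEq α] [LawfulBEq α] {s : PySem.Set α} {x : α} (h : x ∉ s) :
    PySem.Set.add s x = s ++ [x] := by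
  rw [PySem.Set.add, if_neg]
  intro hc
  rw [PySem.Set.contains, List.contains_iff_mem] at hc
  exact h hc

lemma dedup_pair (t n : List Char) :
    PySem.List.dedup [t, n] = if n = t then [t] else [t, n] := by
  rw [PySem.List.dedup_eq_ofList, PySem.Set.ofList_eq_foldl]
  simp only [List.foldl_cons, List.foldl_nil]
  rw [set_add_of_not_mem (List.not_mem_nil), List.nil_append]
  by_cases hnt : n = t
  · rw [set_add_of_mem (by simp [hnt]), if_pos hnt]
  · rw [set_add_of_not_mem (by simp [hnt]), if_neg hnt]
    rfl

lemma dedup_triple (t n c : List Char) :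
    PySem.List.dedup [t, n, c]
      = (if n = t then [t] else [t, n]) ++ (if c = t ∨ c = n then [] else [c]) := by
  rw [PySem.List.dedup_eq_ofList, PySem.Set.ofList_eq_foldl]
  simp only [List.foldl_cons, List.foldl_nil]
  rw [set_add_of_not_mem (List.not_mem_nil), List.nil_append]
  by_cases hnt : n = t
  · have h2 : PySem.Set.add [t] n = [t] := set_add_of_mem (by simp [hnt])
    rw [h2, if_pos hnt]
    by_cases hcm : c = t ∨ c = n
    · have h3 : PySem.Set.add [t] c = [t] :=
        set_add_of_mem (by rcases hcm with h | h <;> simp [h, hnt])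
      rw [h3, if_pos hcm, List.append_nil]
    · obtain ⟨hct, _⟩ := not_or.mp hcm
      have h3 : PySem.Set.add [t] c = [t] ++ [c] := set_add_of_not_mem (by simp [hct])
      rw [h3, if_neg hcm]
  · have h2 : PySem.Set.add [t] n = [t, n] := by
      rw [set_add_of_not_mem (by simp [hnt])]
      rfl
    rw [h2, if_neg hnt]
    by_cases hcm : c = t ∨ c = n
    · have h3 : PySem.Set.add [t, n] c = [t, n] :=
        set_add_of_mem (by rcases hcm with h | h <;> simp [h])
      rw [h3, if_pos hcm, List.append_nil]
    · obtain ⟨hct, hcn⟩ := not_or.mp hcm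
      have h3 : PySem.Set.add [t, n] c = [t, n] ++ [c] :=
        set_add_of_not_mem (by simp [hct, hcn])
      rw [h3, if_neg hcm]

-- dedup of the (at most three) head candidates is B's comparison chain
lemma dedup_head (t n c : List Char) :
    PySem.List.dedup ([t, n] ++ (if c ≠ [] then [c] else []))
      = [t] ++ (if n = t then [] else [n]) ++ (if c ≠ [] ∧ c ≠ t ∧ c ≠ n then [c] else []) := by
  by_cases hc : c = []
  · have e1 : (if c ≠ [] then [c] else []) = ([] : List (List Char)) := by simp [hc]
    have e2 : (if c ≠ [] ∧ c ≠ t ∧ c ≠ n then [c] else []) = ([] : List (List Char)) := by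
      simp [hc]
    rw [e1, e2, List.append_nil, List.append_nil, dedup_pair]
    by_cases hnt : n = t <;> simp [hnt]
  · have e1 : (if c ≠ [] then [c] else []) = [c] := by simp [hc]
    rw [e1, show ([t, n] ++ [c]) = [t, n, c] from rfl, dedup_triple]
    by_cases hcm : c = t ∨ c = n
    · have e2 : (if c ≠ [] ∧ c ≠ t ∧ c ≠ n then [c] else []) = ([] : List (List Char)) := by
        rcases hcm with h | h <;> simp [h]
      rw [e2, if_pos hcm, List.append_nil, List.append_nil]
      by_cases hnt : n = t <;> simp [hnt]
    · obtain ⟨hct, hcn⟩ := not_or.mp hcm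
      have e2 : (if c ≠ [] ∧ c ≠ t ∧ c ≠ n then [c] else []) = [c] := by
        simp [hc, hct, hcn]
      rw [e2, if_neg hcm]
      by_cases hnt : n = t <;> simp [hnt]

-- ---- B's incremental suffix fold, characterised ----

def pvStepC (st : List Char × List (List Char)) (p : List Char) : List Char × List (List Char) :=
  (p ++ '/' :: st.1, st.2 ++ [p ++ '/' :: st.1])

lemma pvTailC (rest : List (List Char)) : ∀ (g : List Char), rest.getLast? = some g →
    (rest.dropLast.reverse).foldl pvStepC (g, [g])
      = (PySem.Chars.join ['/'] rest,
         ((List.range rest.length).reverse).map (fun j => PySem.Chars.join ['/'] (rest.drop j))) := by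
  induction rest with
  | nil => intro g hg; simp at hg
  | cons q rest' ih =>
    intro g hg
    cases rest' with
    | nil =>
      simp only [List.getLast?_singleton, Option.some.injEq] at hg
      subst hg
      simp [PySem.Chars.join_singleton, List.range_succ]
    | cons q2 rest'' =>
      have hg' : (q2 :: rest'').getLast? = some g := by
        rw [← hg, List.getLast?_cons_cons]
      have IH := ih g hg'
      rw [show (q :: q2 :: rest'').dropLast = q :: (q2 :: rest'').dropLast from rfl,
        List.reverse_cons, List.foldl_append, IH]
      simp only [List.foldl_cons, List.foldl_nil, pvStepC]
      rw [Prod.mk.injEq]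
      refine ⟨?_, ?_⟩
      · rw [PySem.Chars.join_cons_cons]
        simp
      · have hrange : (List.range ((q2 :: rest'').length + 1)).reverse
            = ((List.range (q2 :: rest'').length).map Nat.succ).reverse ++ [0] := by
          rw [List.range_succ_eq_map, List.reverse_cons]
        simp only [List.length_cons] at hrange ⊢
        rw [hrange, List.map_append]
        congr 1
        · have e : List.map (fun j => PySem.Chars.join ['/'] (List.drop j (q :: q2 :: rest'')))
              ((List.map Nat.succ (List.range (rest''.length + 1))).reverse)
              = List.map (fun j => PySem.Chars.join ['/'] (List.drop j (q2 :: rest'')))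
                ((List.range (rest''.length + 1)).reverse) := by
            rw [← List.map_reverse, List.map_map]
            apply List.map_congr_left
            intro j hj
            simp
          rw [e, List.map_reverse]

-- ---- pyGetD at -1 and the [1:-1] slice ----

lemma pyGetD_neg_one {α : Type} (xs : List α) (d : α) (h : xs ≠ []) :
    PySem.List.pyGetD xs (-1) d = xs.getLast?.getD d := by
  have hn : 1 ≤ xs.length := List.length_pos_iff.mpr h
  simp only [PySem.List.pyGetD, PySem.List.pyGet?, PySem.List.pyIdx?]
  rw [if_neg (by omega), if_pos (by omega)]
  simp [List.getLast?_eq_getElem?]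

lemma slice_one_neg_one {α : Type} (xs : List α) (h : 2 ≤ xs.length) :
    PySem.List.slice xs (some 1) (some (-1)) = (xs.drop 1).dropLast := by
  simp only [PySem.List.slice, PySem.List.clampIdx]
  rw [if_pos (by omega : (-1 : Int) < 0), if_neg (by omega), if_neg (by omega : ¬ (1 : Int) < 0)]
  have h1 : min (1 : Int).toNat xs.length = 1 := by omega
  have h2 : ((xs.length : Int) + (-1)).toNat = xs.length - 1 := by omega
  rw [h1, h2, List.dropLast_eq_take, List.length_drop]

-- ---- the char-level core equality ----

def pvPartsC (t : List Char) : List (List Char) :=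
  (pvSplit (pvCleanChars (t.map pvSub))).filter (fun p => p ≠ [])

def pvHeadC (t : List Char) : List (List Char) :=
  [t] ++ (if t.map pvSub = t then [] else [t.map pvSub]) ++
    (if PySem.Chars.strip (pvCleanChars (t.map pvSub)) ≠ []
        ∧ PySem.Chars.strip (pvCleanChars (t.map pvSub)) ≠ t
        ∧ PySem.Chars.strip (pvCleanChars (t.map pvSub)) ≠ t.map pvSub
     then [PySem.Chars.strip (pvCleanChars (t.map pvSub))] else [])

def pvYC (t : List Char) : List (List Char) :=
  ((pvJoins (pvPartsC t)).map PySem.Chars.strip).filter (fun s => s ≠ [])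

lemma core_eq (t : List Char) (ht : t ≠ []) (hst : PySem.Chars.strip t = t) :
    PySem.List.dedup
        ((([t, t.map pvSub, pvCleanChars (t.map pvSub)] ++ pvJoins (pvPartsC t)).map
            PySem.Chars.strip).filter (fun s => s ≠ []))
      = pvHeadC t ++ pvYC t := by
  have hsn : PySem.Chars.strip (t.map pvSub) = t.map pvSub := by rw [strip_map_pvSub, hst]
  have hnne : t.map pvSub ≠ [] := by simpa using ht
  simp only [pvHeadC, pvYC, pvPartsC]
  set n := t.map pvSub with hn
  set c0 := pvCleanChars n with hc0
  set c := PySem.Chars.strip c0 with hc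
  set parts := (pvSplit c0).filter (fun p => p ≠ []) with hpartsdef
  set P := parts.length with hP
  -- facts about parts
  have hpart_mem : ∀ p ∈ parts, p ∈ pvSplit c0 := fun p hp => (List.mem_filter.mp hp).1
  have hpart_nos : ∀ p ∈ parts, '/' ∉ p := fun p hp => pvSplit_no_slash c0 p (hpart_mem p hp)
  have hc0_join : PySem.Chars.join ['/'] (pvSplit c0) = c0 := join_pvSplit c0
  have hcount_c0 : c0.count '/' = (pvSplit c0).length - 1 := by
    conv_lhs => rw [← hc0_join]
    exact count_join_sepfree _ (pvSplit_ne_nil c0) (pvSplit_no_slash c0)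
  have hPle : P ≤ (pvSplit c0).length := by
    rw [hP, hpartsdef]
    exact List.length_filter_le _ _
  -- per-index facts about the (stripped) suffix joins
  have hJcount : ∀ k : Nat, k + 1 < P →
      (PySem.Chars.strip (PySem.Chars.join ['/'] (parts.drop (k + 1)))).count '/'
        = P - k - 2 := by
    intro k hk
    rw [count_strip _ _ (by decide)]
    rw [count_join_sepfree _
      (by
        have : (parts.drop (k + 1)).length = P - (k + 1) := by
          rw [List.length_drop, hP]
        intro hnil
        rw [hnil] at this
        simp at this
        omega)
      (fun p hp => hpart_nos p (List.mem_of_mem_drop hp))]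
    rw [List.length_drop, ← hP]
    omega
  have hJlen : ∀ k : Nat, k + 1 < P →
      (PySem.Chars.strip (PySem.Chars.join ['/'] (parts.drop (k + 1)))).length < c0.length := by
    intro k hk
    have h1 := length_strip_le (PySem.Chars.join ['/'] (parts.drop (k + 1)))
    obtain ⟨p0, rest, hpr⟩ : ∃ p0 rest, parts = p0 :: rest := by
      cases hpp : parts with
      | nil => rw [hpp, List.length_nil] at hP; omega
      | cons a b => exact ⟨a, b, rfl⟩
    have hrest : rest ≠ [] := by
      intro hnil
      rw [hpr, hnil] at hP
      simp at hP
      omega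
    have h2 := length_join_drop_lt p0 rest hrest (k + 1) (by omega)
    rw [← hpr] at h2
    have h3 : (PySem.Chars.join ['/'] parts).length
        ≤ (PySem.Chars.join ['/'] (pvSplit c0)).length := by
      rw [hpartsdef]
      exact length_join_filter _
    rw [hc0_join] at h3
    omega
  -- the tail list Y
  have hYmem : ∀ y ∈ ((pvJoins parts).map PySem.Chars.strip).filter (fun s => s ≠ []),
      ∃ k : Nat, k + 1 < P ∧ y = PySem.Chars.strip (PySem.Chars.join ['/'] (parts.drop (k + 1))) := by
    intro y hy
    have hy1 := (List.mem_filter.mp hy).1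
    obtain ⟨x, hx, rfl⟩ := List.mem_map.mp hy1
    rw [pvJoins_eq] at hx
    obtain ⟨k, hk, rfl⟩ := List.mem_map.mp hx
    rw [List.mem_range] at hk
    exact ⟨k, by omega, rfl⟩
  have hYnodup : (((pvJoins parts).map PySem.Chars.strip).filter (fun s => s ≠ [])).Nodup := by
    apply List.Nodup.filter
    rw [pvJoins_eq, List.map_map]
    apply List.Nodup.map_on _ List.nodup_range
    intro x hx y hy hxy
    rw [List.mem_range] at hx hy
    have hcx := hJcount x (by omega)
    have hcy := hJcount y (by omega)
    simp only [Function.comp_apply] at hxy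
    rw [hxy] at hcx
    rw [hcx] at hcy
    omega
  have hYdisj : ∀ y ∈ ((pvJoins parts).map PySem.Chars.strip).filter (fun s => s ≠ []),
      y ∉ ([t, n] ++ (if c ≠ [] then [c] else [])) := by
    intro y hy
    obtain ⟨k, hk, rfl⟩ := hYmem y hy
    have hlen := hJlen k hk
    have hcnt := hJcount k hk
    have hlen_n : c0.length ≤ n.length := length_pvClean_le n
    have hlen_t : n.length = t.length := by rw [hn, List.length_map]
    have hyt : PySem.Chars.strip (PySem.Chars.join ['/'] (parts.drop (k + 1))) ≠ t := by
      intro he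
      have := congrArg List.length he
      omega
    have hyn : PySem.Chars.strip (PySem.Chars.join ['/'] (parts.drop (k + 1))) ≠ n := by
      intro he
      have := congrArg List.length he
      omega
    have hyc : PySem.Chars.strip (PySem.Chars.join ['/'] (parts.drop (k + 1))) ≠ c := by
      intro he
      have hcc : c.count '/' = c0.count '/' := count_strip c0 '/' (by decide)
      have := congrArg (fun l => List.count '/' l) he
      simp only at this
      rw [hcnt, hcc, hcount_c0] at this
      omega
    intro hmem
    rw [List.mem_append] at hmem
    rcases hmem with hmem | hmem
    · rcases List.mem_cons.mp hmem with h1 | h1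
      · exact hyt h1
      · rcases List.mem_cons.mp h1 with h2 | h2
        · exact hyn h2
        · simp at h2
    · by_cases hcnil : c = []
      · rw [if_neg (by simp [hcnil])] at hmem
        simp at hmem
      · rw [if_pos hcnil] at hmem
        exact hyc (by simpa using hmem)
  -- the head of the candidate list
  have hmapstrip : ([t, n, c0] ++ pvJoins parts).map PySem.Chars.strip
      = [t, n, c] ++ (pvJoins parts).map PySem.Chars.strip := by
    rw [List.map_append]
    simp [hst, hsn, hc]
  have hfilter_head : ([t, n, c] : List (List Char)).filter (fun s => s ≠ [])
      = [t, n] ++ (if c ≠ [] then [c] else []) := by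
    by_cases hcnil : c = []
    · rw [if_neg (by simp [hcnil])]
      simp [List.filter, ht, hnne, hcnil]
    · rw [if_pos hcnil]
      simp [List.filter, ht, hnne, hcnil]
  calc PySem.List.dedup ((([t, n, c0] ++ pvJoins parts).map PySem.Chars.strip).filter
          (fun s => s ≠ []))
      = PySem.List.dedup (([t, n] ++ (if c ≠ [] then [c] else []))
          ++ ((pvJoins parts).map PySem.Chars.strip).filter (fun s => s ≠ [])) := by
        rw [hmapstrip, List.filter_append, hfilter_head]
    _ = PySem.List.dedup ([t, n] ++ (if c ≠ [] then [c] else []))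
          ++ ((pvJoins parts).map PySem.Chars.strip).filter (fun s => s ≠ []) :=
        dedup_append_disjoint _ _ hYnodup hYdisj
    _ = ([t] ++ (if n = t then [] else [n]) ++ (if c ≠ [] ∧ c ≠ t ∧ c ≠ n then [c] else []))
          ++ ((pvJoins parts).map PySem.Chars.strip).filter (fun s => s ≠ []) := by
        rw [dedup_head]

-- ---- string-level plumbing for the final assembly ----

lemma ofList_eq_ofList_iff (a b : List Char) : String.ofList a = String.ofList b ↔ a = b :=
  ofList_injective.eq_iff

lemma map_strip_map_ofList (X : List (List Char)) :
    (X.map String.ofList).map PySem.Str.strip = (X.map PySem.Chars.strip).map String.ofList := by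
  rw [List.map_map, List.map_map]
  apply List.map_congr_left
  intro x _
  simp only [Function.comp_apply]
  exact strip_ofList x

-- B's string fold mirrors the char-level fold
lemma pvFoldS (l : List (List Char)) : ∀ (s : List Char) (tl : List (List Char)),
    (l.map String.ofList).foldl
      (fun (st : String × List String) part =>
        (String.ofList (part.toList ++ '/' :: st.1.toList),
         st.2 ++ [String.ofList (part.toList ++ '/' :: st.1.toList)]))
      (String.ofList s, tl.map String.ofList)
    = (String.ofList ((l.foldl pvStepC (s, tl)).1),
       ((l.foldl pvStepC (s, tl)).2).map String.ofList) := by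
  induction l with
  | nil => intro s tl; simp
  | cons p l' ih =>
    intro s tl
    simp only [List.map_cons, List.foldl_cons, String.toList_ofList, pvStepC]
    have hih := ih (p ++ '/' :: s) (tl ++ [p ++ '/' :: s])
    simp only [List.map_append, List.map_cons, List.map_nil] at hih
    exact hih

-- B's tail block produces exactly the suffix joins (as strings)
lemma pvTailS (partsC : List (List Char)) :
    (if ((partsC.map String.ofList).length ≥ 2) then
      (((PySem.List.slice (partsC.map String.ofList) (some 1) (some (-1))).reverse).foldl
        (fun (st : String × List String) part =>
          (String.ofList (part.toList ++ '/' :: st.1.toList),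
           st.2 ++ [String.ofList (part.toList ++ '/' :: st.1.toList)]))
        (PySem.List.pyGetD (partsC.map String.ofList) (-1) "",
         [PySem.List.pyGetD (partsC.map String.ofList) (-1) ""])).2.reverse
     else [])
    = (pvJoins partsC).map String.ofList := by
  by_cases hP : (partsC.map String.ofList).length ≥ 2
  · rw [if_pos hP]
    rw [List.length_map] at hP
    obtain ⟨p0, rest, rfl⟩ : ∃ p0 rest, partsC = p0 :: rest := by
      cases hpp : partsC with
      | nil => rw [hpp, List.length_nil] at hP; omega
      | cons a b => exact ⟨a, b, rfl⟩
    have hrest : rest ≠ [] := by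
      intro hnil
      rw [hnil] at hP
      simp at hP
    obtain ⟨g, hg⟩ := Option.isSome_iff_exists.mp ((List.getLast?_isSome).mpr hrest)
    have hlast : PySem.List.pyGetD ((p0 :: rest).map String.ofList) (-1) ""
        = String.ofList g := by
      rw [pyGetD_neg_one _ _ (by simp), List.getLast?_map]
      have hgl : (p0 :: rest).getLast? = some g := by
        obtain ⟨q1, rest1, rfl⟩ := List.exists_cons_of_ne_nil hrest
        rw [List.getLast?_cons_cons]
        exact hg
      rw [hgl]
      rfl
    rw [hlast]
    have hslice : PySem.List.slice ((p0 :: rest).map String.ofList) (some 1) (some (-1))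
        = (rest.dropLast).map String.ofList := by
      rw [slice_one_neg_one _ (by simpa using hP)]
      simp [List.map_dropLast]
    rw [hslice, ← List.map_reverse]
    have hfold := pvFoldS (rest.dropLast.reverse) g [g]
    simp only [List.map_cons, List.map_nil] at hfold
    rw [hfold, pvTailC rest g hg]
    rw [← List.map_reverse]
    have hsnd : ((((List.range rest.length).reverse).map
          (fun j => PySem.Chars.join ['/'] (rest.drop j))).reverse)
        = (List.range rest.length).map (fun j => PySem.Chars.join ['/'] (rest.drop j)) := by
      rw [← List.map_reverse, List.reverse_reverse]
    rw [hsnd, pvJoins_eq]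
    simp only [List.length_cons, Nat.add_sub_cancel, List.drop_succ_cons]
  · rw [if_neg hP]
    rw [List.length_map] at hP
    have hnil : PySem.List.pyRange 1 ((partsC.length : Int)) 1 = [] :=
      PySem.List.pyRange_one_eq_nil (by omega)
    rw [pvJoins, hnil]
    simp

-- ===== VERDICT (by name: the statement is the Claim_ definition above) =====
set_option maxHeartbeats 1000000 in
theorem candidate_repo_paths_py_spec : Claim_equal_candidate_repo_paths_py := by
  intro requested _
  unfold Spec_candidate_repo_paths_py
  by_cases h : PySem.Str.strip requested = ""
  · simp [candidate_repo_paths_py, candidate_repo_paths_py_alt, h]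
  · simp only [candidate_repo_paths_py, candidate_repo_paths_py_alt, h, if_false,
      ← pvCleanChars_eq_B]
    rw [pvAdd_chain]
    have ht : PySem.Str.strip requested
        = String.ofList (PySem.Chars.strip requested.toList) := by
      apply String.toList_inj.mp
      simp
    set t := PySem.Chars.strip requested.toList with htdef
    have htne : t ≠ [] := by
      intro hnil
      apply h
      rw [ht, hnil]
    have hst : PySem.Chars.strip t = t := strip_idem _
    rw [ht]
    have hrep : PySem.Str.replace (String.ofList t) "\\" "/"
        = String.ofList (t.map pvSub) := by
      apply String.toList_inj.mp
      rw [PySem.Str.toList_replace]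
      simp only [String.toList_ofList]
      rw [show ("\\" : String).toList = ['\\'] from by decide,
          show ("/" : String).toList = ['/'] from by decide, replace_single]
      rfl
    rw [hrep]
    simp only [String.toList_ofList, splitOn_single, filter_ne_empty_map_ofList]
    have hpc : (pvSplit (pvCleanChars (t.map pvSub))).filter (fun p => p ≠ [])
        = pvPartsC t := rfl
    rw [hpc]
    have hjoins : (PySem.List.pyRange 1 ((((pvPartsC t).map String.ofList).length : Int)) 1).map
          (fun i => PySem.Str.join "/" (((pvPartsC t).map String.ofList).drop i.toNat))
        = (pvJoins (pvPartsC t)).map String.ofList := by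
      rw [pvJoins, List.map_map, List.length_map]
      apply List.map_congr_left
      intro i _
      simp only [Function.comp_apply]
      apply String.toList_inj.mp
      rw [PySem.Str.toList_join]
      rw [show ("/" : String).toList = ['/'] from by decide]
      rw [← List.map_drop, List.map_map]
      simp only [String.toList_ofList]
      have : (String.toList ∘ String.ofList) = (id : List Char → List Char) := by
        funext x
        simp
      rw [this, List.map_id]
    rw [hjoins]
    have hcands : ([String.ofList t, String.ofList (t.map pvSub),
          String.ofList (pvCleanChars (t.map pvSub))] ++ (pvJoins (pvPartsC t)).map String.ofList)
        = ([t, t.map pvSub, pvCleanChars (t.map pvSub)] ++ pvJoins (pvPartsC t)).map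
            String.ofList := by
      simp
    rw [hcands, map_strip_map_ofList, filter_ne_empty_map_ofList,
      dedup_map_injective _ ofList_injective, core_eq t htne hst]
    -- B side
    rw [pvTailS (pvPartsC t), map_strip_map_ofList, filter_ne_empty_map_ofList]
    have hY : ((pvJoins (pvPartsC t)).map PySem.Chars.strip).filter (fun s => s ≠ [])
        = pvYC t := rfl
    rw [hY, List.map_append]
    have hcstr : PySem.Str.strip (String.ofList (pvCleanChars (t.map pvSub)))
        = String.ofList (PySem.Chars.strip (pvCleanChars (t.map pvSub))) :=
      strip_ofList _
    rw [hcstr, pvHeadC]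
    by_cases h1 : t.map pvSub = t <;>
      by_cases h2 : PySem.Chars.strip (pvCleanChars (t.map pvSub)) ≠ []
          ∧ PySem.Chars.strip (pvCleanChars (t.map pvSub)) ≠ t
          ∧ PySem.Chars.strip (pvCleanChars (t.map pvSub)) ≠ t.map pvSub <;>
      simp [h1, h2, ofList_eq_ofList_iff, String.ofList_eq_empty_iff] <;>
      by_cases h3 : ¬PySem.Chars.strip (pvCleanChars t) = []
          ∧ ¬PySem.Chars.strip (pvCleanChars t) = t <;>
      simp [h3]
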